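-- pv_equiv track=rewrite | github.com/Amedar-Asterisk/U-Statistics-python | tensor_sum.py | normalize_indexes
-- ===== SOURCE A (Python) =====
-- def normalize_indexes(lst):
--     num_to_index = {}
--     normalized_lst = []
--     index_to_num = {}
--     current_index = 0
--     for t in lst:
--         normalized_tuple = []
--         for num in t:
--             if num not in num_to_index:
--                 num_to_index[num] = current_index
--                 index_to_num[current_index] = num
--                 current_index += 1
--             normalized_tuple.append(num_to_index[num])
--         normalized_lst.append(tuple(normalized_tuple))
--
--     return normalized_lst, index_to_num
-- ===== SOURCE B (Python) =====
-- def normalize_indexes(lst):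
--     # Pass 1: record each number's first-occurrence position in the flattened input.
--     first = {}
--     pos = 0
--     for t in lst:
--         for num in t:
--             if num not in first:
--                 first[num] = pos
--             pos += 1
--     # Rank each number by counting how many first-occurrence positions precede its own.
--     rank = {num: sum(1 for q in first.values() if q < p) for num, p in first.items()}
--     normalized_lst = [tuple(rank[num] for num in t) for t in lst]
--     index_to_num = {rank[num]: num for num in first}
--     return normalized_lst, index_to_num
-- ===== Notes on version B (the rewrite author's own statement) =====
-- stated objective: alternative
-- what changed: A assigns indices with a running counter while building both dicts and the output in one interleaved pass; B instead records each number's first-occurrence position in the flattened input, derives each number's index by COUNTING how many first-occurrence positions precede its own (rank-by-counting, no counter), and then produces the normalized tuples and the inverse dict by pure lookups.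
import Mathlib
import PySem

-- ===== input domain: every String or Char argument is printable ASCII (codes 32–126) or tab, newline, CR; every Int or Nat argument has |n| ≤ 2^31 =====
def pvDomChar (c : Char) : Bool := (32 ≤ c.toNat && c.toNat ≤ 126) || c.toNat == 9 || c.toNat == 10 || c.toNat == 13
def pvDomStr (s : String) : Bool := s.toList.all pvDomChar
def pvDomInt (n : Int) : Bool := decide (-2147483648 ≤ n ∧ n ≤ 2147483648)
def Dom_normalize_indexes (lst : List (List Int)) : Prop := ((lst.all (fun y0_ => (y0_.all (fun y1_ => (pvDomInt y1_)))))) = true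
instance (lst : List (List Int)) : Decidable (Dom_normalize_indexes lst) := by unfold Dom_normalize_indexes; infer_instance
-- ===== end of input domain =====

-- B replaces A's running-counter single pass by a rank-by-counting scheme: record first-occurrence
-- positions, then each number's index is the COUNT of first-occurrence positions before its own;
-- objective: alternative (not faster).

-- ===== PORT A =====
-- state: (num_to_index, normalized_tuple/list, index_to_num, current_index)
def niInner (st : PySem.Dict Int Int × List Int × PySem.Dict Int Int × Int) (num : Int) :
    PySem.Dict Int Int × List Int × PySem.Dict Int Int × Int :=
  let d := st.1; let nt := st.2.1; let inv := st.2.2.1; let c := st.2.2.2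
  -- if num not in num_to_index: insert into both dicts, bump current_index
  let upd := if d.contains num then (d, inv, c) else (d.insert num c, inv.insert c num, c + 1)
  -- normalized_tuple.append(num_to_index[num])  (key always present here, so getD is exact)
  (upd.1, nt ++ [upd.1.getD num 0], upd.2.1, upd.2.2)

def niOuter (acc : PySem.Dict Int Int × List (List Int) × PySem.Dict Int Int × Int) (t : List Int) :
    PySem.Dict Int Int × List (List Int) × PySem.Dict Int Int × Int :=
  let r := t.foldl niInner (acc.1, [], acc.2.2.1, acc.2.2.2)
  (r.1, acc.2.1 ++ [r.2.1], r.2.2.1, r.2.2.2)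

def normalize_indexes (lst : List (List Int)) : List (List Int) × (List (Int × Int)) :=
  let s := lst.foldl niOuter (PySem.Dict.empty, [], PySem.Dict.empty, 0)
  (s.2.1, s.2.2.1.items)

-- ===== PORT B =====
-- pass 1 state: (first, pos); 'if num not in first: first[num] = pos' then 'pos += 1'
def nbInner (st : PySem.Dict Int Int × Int) (num : Int) : PySem.Dict Int Int × Int :=
  ((if st.1.contains num then st.1 else st.1.insert num st.2), st.2 + 1)

-- sum(1 for q in vals if q < p)
def nbCount (vals : List Int) (p : Int) : Int :=
  vals.foldl (fun acc q => if q < p then acc + 1 else acc) 0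

-- {num: sum(1 for q in first.values() if q < p) for num, p in first.items()}
def nbRank (first : PySem.Dict Int Int) : PySem.Dict Int Int :=
  first.items.foldl (fun r np => r.insert np.1 (nbCount first.values np.2)) PySem.Dict.empty

def normalize_indexes_alt (lst : List (List Int)) : List (List Int) × (List (Int × Int)) :=
  let first := (lst.foldl (fun st t => t.foldl nbInner st) (PySem.Dict.empty, 0)).1
  let rank := nbRank first
  (lst.map (fun t => t.map (fun num => rank.getD num 0)),
   (first.keys.foldl (fun d num => d.insert (rank.getD num 0) num) PySem.Dict.empty).items)

-- ===== PRECONDITION & SPEC =====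
def Spec_normalize_indexes (lst : List (List Int)) (out : List (List Int) × (List (Int × Int))) : Prop := out = normalize_indexes_alt lst
instance (lst : List (List Int)) (out : List (List Int) × (List (Int × Int))) : Decidable (Spec_normalize_indexes lst out) := by unfold Spec_normalize_indexes; infer_instance

-- ===== CLAIM (what is proved, stated in full; the proofs are below) =====
def Claim_equal_normalize_indexes : Prop := ∀ (lst : List (List Int)), Dom_normalize_indexes lst → Spec_normalize_indexes lst (normalize_indexes lst)

-- ===== LEMMAS AND PROOFS =====

-- Invariant of A's loop after having processed the flattened prefix p
-- (PySem.Set.ofList p is the first-occurrence dedup of p).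
def NIInv (p : List Int) (d inv : PySem.Dict Int Int) (c : Int) : Prop :=
  (∀ n : Int, d.contains n = decide (n ∈ p)) ∧
  (∀ n ∈ p, d.getD n 0 = (List.idxOf n (PySem.Set.ofList p) : Int)) ∧
  c = ((PySem.Set.ofList p).length : Int) ∧
  inv.items = PySem.List.enumerate (PySem.Set.ofList p)

theorem ofList_contains (p : List Int) (n : Int) :
    (PySem.Set.ofList p).contains n = decide (n ∈ p) := by
  simp [PySem.Set.contains, List.contains_eq_mem, PySem.Set.mem_ofList]

theorem ofList_append_one (p : List Int) (n : Int) :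
    PySem.Set.ofList (p ++ [n]) =
      if n ∈ p then PySem.Set.ofList p else PySem.Set.ofList p ++ [n] := by
  have h1 : PySem.Set.ofList (p ++ [n]) = PySem.Set.add (PySem.Set.ofList p) n := by
    simp [PySem.Set.ofList, List.foldl_append]
  rw [h1]
  unfold PySem.Set.add
  rw [ofList_contains]
  by_cases h : n ∈ p <;> simp [h]

theorem foldl_add_prefix : ∀ (q : List Int) (s : PySem.Set Int),
    s <+: q.foldl PySem.Set.add s := by
  intro q
  induction q with
  | nil => intro s; exact List.prefix_refl s
  | cons x q ih =>
    intro s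
    refine List.IsPrefix.trans ?_ (ih (PySem.Set.add s x))
    unfold PySem.Set.add
    split
    · exact List.prefix_refl s
    · exact List.prefix_append s [x]

theorem ofList_prefix (p q : List Int) :
    PySem.Set.ofList p <+: PySem.Set.ofList (p ++ q) := by
  simpa [PySem.Set.ofList, List.foldl_append] using foldl_add_prefix q (PySem.Set.ofList p)

theorem idxOf_prefix_stable {l₁ l₂ : List Int} {n : Int} (hp : l₁ <+: l₂) (h : n ∈ l₁) :
    List.idxOf n l₂ = List.idxOf n l₁ := by
  obtain ⟨r, rfl⟩ := hp
  rw [List.idxOf_append]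
  simp [h]

theorem idxOf_ofList_stable (p q : List Int) (n : Int) (h : n ∈ p) :
    List.idxOf n (PySem.Set.ofList (p ++ q)) = List.idxOf n (PySem.Set.ofList p) :=
  idxOf_prefix_stable (ofList_prefix p q) ((PySem.Set.mem_ofList p n).mpr h)

theorem inv_contains_fresh (p : List Int) (inv : PySem.Dict Int Int)
    (h : inv.items = PySem.List.enumerate (PySem.Set.ofList p)) :
    inv.contains ((PySem.Set.ofList p).length : Int) = false := by
  by_contra hc
  rw [Bool.not_eq_false, PySem.Dict.contains_iff_mem_keys] at hc
  unfold PySem.Dict.keys at hc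
  rw [h] at hc
  obtain ⟨pr, hpr, hfst⟩ := List.mem_map.mp hc
  obtain ⟨k, hk, rfl⟩ := (PySem.List.mem_enumerate_iff _ _ _).mp hpr
  simp only [zero_add] at hfst
  omega

theorem inner_spec : ∀ (t p : List Int) (d inv : PySem.Dict Int Int) (c : Int) (nt : List Int),
    NIInv p d inv c →
    ∃ d' inv' c', t.foldl niInner (d, nt, inv, c) =
      (d', nt ++ t.map (fun n => (List.idxOf n (PySem.Set.ofList (p ++ t)) : Int)), inv', c') ∧
      NIInv (p ++ t) d' inv' c' := by
  intro t
  induction t with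
  | nil => intro p d inv c nt h; exact ⟨d, inv, c, by simp, by simpa using h⟩
  | cons n t ih =>
    intro p d inv c nt h
    obtain ⟨hcont, hgetD, hc, hinv⟩ := h
    have hassoc : p ++ n :: t = (p ++ [n]) ++ t := by simp
    by_cases hn : n ∈ p
    · -- seen before: state unchanged, value = stored index
      have hval : List.idxOf n (PySem.Set.ofList (p ++ n :: t)) =
          List.idxOf n (PySem.Set.ofList p) := idxOf_ofList_stable p (n :: t) n hn
      have hstep : niInner (d, nt, inv, c) n =
          (d, nt ++ [(List.idxOf n (PySem.Set.ofList (p ++ n :: t)) : Int)], inv, c) := by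
        rw [hval]
        simp [niInner, hcont n, hn, hgetD n hn]
      have hded : PySem.Set.ofList (p ++ [n]) = PySem.Set.ofList p := by
        rw [ofList_append_one]; simp [hn]
      have hInv1 : NIInv (p ++ [n]) d inv c := by
        refine ⟨?_, ?_, by rw [hded]; exact hc, by rw [hded]; exact hinv⟩
        · intro m; rw [hcont m]; by_cases hm : m = n <;> simp [hm, hn]
        · intro m hm
          rw [hded]
          rcases List.mem_append.mp hm with hm | hm
          · exact hgetD m hm
          · simp only [List.mem_singleton] at hm; subst hm; exact hgetD m hn
      obtain ⟨d', inv', c', heq, hInv'⟩ := ih (p ++ [n]) d inv c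
        (nt ++ [(List.idxOf n (PySem.Set.ofList (p ++ n :: t)) : Int)]) hInv1
      refine ⟨d', inv', c', ?_, by rwa [hassoc]⟩
      rw [List.foldl_cons, hstep, heq, ← hassoc]
      simp
    · -- fresh: both dicts extended, value = current_index
      have hcontn : d.contains n = false := by rw [hcont n]; simp [hn]
      have hded : PySem.Set.ofList (p ++ [n]) = PySem.Set.ofList p ++ [n] := by
        rw [ofList_append_one]; simp [hn]
      have hnot : n ∉ PySem.Set.ofList p := fun hmem =>
        hn ((PySem.Set.mem_ofList p n).mp hmem)
      have hidxn : List.idxOf n (PySem.Set.ofList (p ++ [n])) =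
          (PySem.Set.ofList p).length := by
        rw [hded, List.idxOf_append, if_neg hnot]
        simp
      have hval : List.idxOf n (PySem.Set.ofList (p ++ n :: t)) =
          (PySem.Set.ofList p).length := by
        rw [hassoc, idxOf_ofList_stable (p ++ [n]) t n (by simp), hidxn]
      have hstep : niInner (d, nt, inv, c) n =
          (d.insert n c, nt ++ [(List.idxOf n (PySem.Set.ofList (p ++ n :: t)) : Int)],
           inv.insert c n, c + 1) := by
        rw [hval]
        simp [niInner, hcontn, hc, PySem.Dict.getD_insert_self]
      have hInv1 : NIInv (p ++ [n]) (d.insert n c) (inv.insert c n) (c + 1) := by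
        refine ⟨?_, ?_, ?_, ?_⟩
        · intro m
          rw [PySem.Dict.contains_insert, hcont m]
          by_cases hm : m = n <;> simp [hm]
        · intro m hm
          rw [PySem.Dict.getD_insert]
          by_cases hmn : m = n
          · subst hmn; rw [if_pos rfl, hc, hidxn]
          · rw [if_neg hmn]
            rcases List.mem_append.mp hm with hm | hm
            · rw [hgetD m hm, hded, List.idxOf_append,
                if_pos ((PySem.Set.mem_ofList p m).mpr hm)]
            · simp only [List.mem_singleton] at hm; exact absurd hm hmn
        · rw [hded, hc]
          simp
        · have hfree : inv.contains ((PySem.Set.ofList p).length : Int) = false :=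
            inv_contains_fresh p inv hinv
          rw [hc, PySem.Dict.items_insert_of_not_contains _ _ hfree, hinv, hded,
            PySem.List.enumerate_append]
          simp [PySem.List.enumerate_cons, PySem.List.enumerate_nil]
      obtain ⟨d', inv', c', heq, hInv'⟩ := ih (p ++ [n]) (d.insert n c) (inv.insert c n) (c + 1)
        (nt ++ [(List.idxOf n (PySem.Set.ofList (p ++ n :: t)) : Int)]) hInv1
      refine ⟨d', inv', c', ?_, by rwa [hassoc]⟩
      rw [List.foldl_cons, hstep, heq, ← hassoc]
      simp

theorem outer_spec : ∀ (L : List (List Int)) (p : List Int) (d inv : PySem.Dict Int Int)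
    (c : Int) (out : List (List Int)), NIInv p d inv c →
    ∃ d' inv' c', L.foldl niOuter (d, out, inv, c) =
      (d', out ++ L.map (fun t => t.map
        (fun n => (List.idxOf n (PySem.Set.ofList (p ++ L.flatten)) : Int))), inv', c') ∧
      NIInv (p ++ L.flatten) d' inv' c' := by
  intro L
  induction L with
  | nil => intro p d inv c out h; exact ⟨d, inv, c, by simp, by simpa using h⟩
  | cons t L ih =>
    intro p d inv c out h
    obtain ⟨d₁, inv₁, c₁, heq₁, hInv₁⟩ := inner_spec t p d inv c [] h
    obtain ⟨d', inv', c', heq, hInv'⟩ := ih (p ++ t) d₁ inv₁ c₁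
      (out ++ [t.map (fun n => (List.idxOf n (PySem.Set.ofList (p ++ t)) : Int))]) hInv₁
    have hassoc : p ++ (t :: L).flatten = (p ++ t) ++ L.flatten := by simp
    refine ⟨d', inv', c', ?_, by rwa [hassoc]⟩
    rw [List.foldl_cons]
    have hstep : niOuter (d, out, inv, c) t =
        (d₁, out ++ [t.map (fun n => (List.idxOf n (PySem.Set.ofList (p ++ t)) : Int))],
         inv₁, c₁) := by
      simp only [niOuter, heq₁, List.nil_append]
    rw [hstep, heq, hassoc]
    have hhead : t.map (fun n => (List.idxOf n (PySem.Set.ofList (p ++ t)) : Int)) =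
        t.map (fun n => (List.idxOf n (PySem.Set.ofList ((p ++ t) ++ L.flatten)) : Int)) := by
      refine List.map_congr_left fun n hn => ?_
      rw [idxOf_ofList_stable (p ++ t) L.flatten n (by simp [hn])]
    rw [hhead]
    simp

-- A's result, characterised: indices are positions in the first-occurrence dedup of the flattened input
theorem A_char (lst : List (List Int)) :
    normalize_indexes lst =
      (lst.map (fun t => t.map
        (fun n => (List.idxOf n (PySem.Set.ofList lst.flatten) : Int))),
       PySem.List.enumerate (PySem.Set.ofList lst.flatten)) := by
  unfold normalize_indexes
  have h0 : NIInv [] PySem.Dict.empty PySem.Dict.empty 0 := by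
    refine ⟨?_, ?_, ?_, ?_⟩
    · intro n; simp [PySem.Dict.contains_empty]
    · intro n hmem; cases hmem
    · simp [PySem.Set.ofList]
    · simp only [PySem.Set.ofList, List.foldl_nil]
      rfl
  obtain ⟨d', inv', c', heq, hInv'⟩ := outer_spec lst [] PySem.Dict.empty PySem.Dict.empty 0 [] h0
  simp only [List.nil_append] at heq
  rw [heq]
  exact Prod.ext rfl hInv'.2.2.2

-- ====== B-side lemmas ======

theorem set_foldl_add_eq : ∀ (xs : List Int) (s : List Int),
    xs.foldl PySem.Set.add s = s ++ (PySem.Set.ofList xs).filter (fun n => !s.contains n) := by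
  intro xs
  induction xs with
  | nil => intro s; simp [PySem.Set.ofList]
  | cons y xs ih =>
    intro s
    have hofl : PySem.Set.ofList (y :: xs) =
        [y] ++ (PySem.Set.ofList xs).filter (fun n => !(List.contains [y] n)) := by
      have h1 := ih (PySem.Set.add [] y)
      simp only [PySem.Set.ofList, List.foldl_cons] at h1 ⊢
      simpa [PySem.Set.add] using h1
    rw [List.foldl_cons, ih (PySem.Set.add s y), hofl]
    by_cases hy : y ∈ s
    · have hyc : s.contains y = true := by simpa [List.contains_eq_mem] using hy
      have hadd : PySem.Set.add s y = s := by simp [PySem.Set.add, hy]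
      rw [hadd]
      congr 1
      rw [List.filter_append, List.filter_filter]
      have : List.filter (fun n => !s.contains n) [y] = [] := by
        simp [List.contains_eq_mem, hy]
      rw [this, List.nil_append]
      refine List.filter_congr fun n hn => ?_
      by_cases hne : n = y
      · subst hne; simp [List.contains_eq_mem, hy]
      · simp [List.contains_eq_mem, hne]
    · have hyc : s.contains y = false := by simpa [List.contains_eq_mem] using hy
      have hadd : PySem.Set.add s y = s ++ [y] := by simp [PySem.Set.add, hy]
      rw [hadd, List.append_assoc]
      congr 1
      rw [List.filter_append]
      have : List.filter (fun n => !s.contains n) [y] = [y] := by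
        simp [List.contains_eq_mem, hy]
      rw [this]
      congr 1
      rw [List.filter_filter]
      refine List.filter_congr fun n hn => ?_
      by_cases hne : n = y
      · subst hne; simp [List.contains_eq_mem, hy]
      · simp [List.contains_eq_mem, hne]

theorem ofList_cons (y : Int) (xs : List Int) :
    PySem.Set.ofList (y :: xs) =
      y :: (PySem.Set.ofList xs).filter (fun n => decide (n ≠ y)) := by
  have h0 : PySem.Set.ofList (y :: xs) = xs.foldl PySem.Set.add [y] := by
    simp [PySem.Set.ofList, PySem.Set.add]
  rw [h0, set_foldl_add_eq xs [y]]
  simp only [List.singleton_append, List.cons.injEq, true_and]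
  refine List.filter_congr fun n hn => ?_
  simp [List.contains_eq_mem, eq_comm]

theorem nbFirst_items : ∀ (f : List Int) (d : PySem.Dict Int Int) (i : Int),
    (f.foldl nbInner (d, i)).1.items =
      d.items ++ ((PySem.Set.ofList f).filter (fun n => !d.contains n)).map
        (fun n => (n, i + (List.idxOf n f : Int))) := by
  intro f
  induction f with
  | nil => intro d i; simp [PySem.Set.ofList]
  | cons num rest ih =>
    intro d i
    rw [List.foldl_cons, ofList_cons]
    by_cases hc : d.contains num = true
    · have hstep : nbInner (d, i) num = (d, i + 1) := by simp [nbInner, hc]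
      rw [hstep, ih d (i + 1)]
      congr 1
      rw [List.filter_cons_of_neg (by simp [hc]), List.filter_filter]
      have hfe : List.filter (fun a => !d.contains a && decide (a ≠ num)) (PySem.Set.ofList rest)
          = List.filter (fun n => !d.contains n) (PySem.Set.ofList rest) := by
        refine List.filter_congr fun n hn => ?_
        by_cases hne : n = num
        · subst hne; simp [hc]
        · simp [hne]
      rw [hfe]
      refine List.map_congr_left fun n hn => ?_
      have hne : n ≠ num := by
        have h2 := (List.mem_filter.mp hn).2
        intro h; subst h; simp [hc] at h2
      rw [List.idxOf_cons_ne _ (Ne.symm hne)]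
      have : i + 1 + (List.idxOf n rest : Int) = i + ((List.idxOf n rest : Int) + 1) := by ring
      simp [this]
    · have hcf : d.contains num = false := by simpa using hc
      have hstep : nbInner (d, i) num = (d.insert num i, i + 1) := by simp [nbInner, hcf]
      rw [hstep, ih _ (i + 1), PySem.Dict.items_insert_of_not_contains _ _ hcf]
      rw [List.filter_cons_of_pos (by simp [hcf]), List.filter_filter, List.map_cons,
        List.idxOf_cons_self, List.append_assoc, List.singleton_append]
      congr 1
      have hfil : List.filter (fun n => !(d.insert num i).contains n) (PySem.Set.ofList rest) =
          List.filter (fun a => !d.contains a && decide (a ≠ num)) (PySem.Set.ofList rest) := by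
        refine List.filter_congr fun n hn => ?_
        rw [PySem.Dict.contains_insert]
        by_cases hne : n = num
        · subst hne; simp
        · simp [hne, Bool.and_comm]
      have hhead : i + ((0 : Nat) : Int) = i := by simp
      rw [hfil, hhead]
      congr 1
      refine List.map_congr_left fun n hn => ?_
      have hne : n ≠ num := by
        have h2 := (List.mem_filter.mp hn).2
        simp at h2
        exact h2.2
      rw [List.idxOf_cons_ne _ (Ne.symm hne)]
      have : i + 1 + (List.idxOf n rest : Int) = i + ((List.idxOf n rest : Int) + 1) := by ring
      simp [this]

theorem ofList_pairwise_idxOf : ∀ (f : List Int),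
    (PySem.Set.ofList f).Pairwise (fun a b => List.idxOf a f < List.idxOf b f) := by
  intro f
  induction f with
  | nil => simp [PySem.Set.ofList]
  | cons x rest ih =>
    rw [ofList_cons]
    refine List.Pairwise.cons ?_ ?_
    · intro b hb
      have hne : b ≠ x := by simpa using (List.mem_filter.mp hb).2
      rw [List.idxOf_cons_self, List.idxOf_cons_ne _ (Ne.symm hne)]
      omega
    · have hsub := List.Pairwise.sublist
        (l₁ := (PySem.Set.ofList rest).filter (fun n => decide (n ≠ x))) List.filter_sublist ih
      refine List.Pairwise.imp_of_mem ?_ hsub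
      intro a b ha hb hab
      have hna : a ≠ x := by simpa using (List.mem_filter.mp ha).2
      have hnb : b ≠ x := by simpa using (List.mem_filter.mp hb).2
      rw [List.idxOf_cons_ne _ (Ne.symm hna), List.idxOf_cons_ne _ (Ne.symm hnb)]
      omega

theorem nbCount_eq_countP (vals : List Int) (p : Int) :
    nbCount vals p = (List.countP (fun q => decide (q < p)) vals : Int) := by
  unfold nbCount
  have h := PySem.List.foldl_count_if (fun q : Int => decide (q < p)) vals 0
  simpa using h

theorem count_lt_key : ∀ (l : List Int) (key : Int → Int),
    l.Pairwise (fun a b => key a < key b) → ∀ n, n ∈ l →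
    nbCount (l.map key) (key n) = (List.idxOf n l : Int) := by
  intro l
  induction l with
  | nil => intro key _ n hn; cases hn
  | cons a l ih =>
    intro key hpw n hn
    have hhead := List.pairwise_cons.mp hpw
    rw [nbCount_eq_countP]
    rcases List.mem_cons.mp hn with rfl | hn'
    · rw [List.idxOf_cons_self]
      have hz : List.countP (fun q => decide (q < key n)) ((n :: l).map key) = 0 := by
        rw [List.countP_eq_zero]
        intro q hq
        rcases List.mem_map.mp hq with ⟨b, hb, rfl⟩
        rcases List.mem_cons.mp hb with rfl | hb'
        · simp
        · have hb2 := hhead.1 b hb'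
          simp only [decide_eq_true_eq, not_lt]
          omega
      rw [hz]
    · have hne : a ≠ n := by
        intro h
        have hlt := hhead.1 n hn'
        rw [h] at hlt
        exact lt_irrefl _ hlt
      rw [List.idxOf_cons_ne _ hne]
      have ihv := ih key hhead.2 n hn'
      rw [nbCount_eq_countP] at ihv
      rw [List.map_cons, List.countP_cons]
      have ha : (decide (key a < key n)) = true := by
        simp [hhead.1 n hn']
      simp only [ha]
      push_cast
      omega

theorem idxOf_inj_mem {l : List Int} (_h : l.Nodup) {a b : Int} (ha : a ∈ l) (hb : b ∈ l)
    (he : List.idxOf a l = List.idxOf b l) : a = b := by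
  have hal : List.idxOf a l < l.length := List.idxOf_lt_length_of_mem ha
  have hbl : List.idxOf b l < l.length := List.idxOf_lt_length_of_mem hb
  have h1 : l[List.idxOf a l] = a := List.getElem_idxOf hal
  have h2 : l[List.idxOf b l] = b := List.getElem_idxOf hbl
  rw [← h1, ← h2]
  congr 1

theorem map_idxOf_enumerate (l : List Int) (h : l.Nodup) :
    l.map (fun n => ((List.idxOf n l : Int), n)) = PySem.List.enumerate l 0 := by
  refine List.ext_getElem ?_ ?_
  · simp [PySem.List.length_enumerate]
  · intro i hi hj
    rw [List.getElem_map]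
    rw [PySem.List.getElem_enumerate l 0 i hj]
    have hil : i < l.length := by simpa using hi
    rw [List.Nodup.idxOf_getElem h i hil]
    simp

theorem B_char (lst : List (List Int)) :
    normalize_indexes_alt lst =
      (lst.map (fun t => t.map
        (fun n => (List.idxOf n (PySem.Set.ofList lst.flatten) : Int))),
       PySem.List.enumerate (PySem.Set.ofList lst.flatten)) := by
  unfold normalize_indexes_alt
  set F := lst.flatten with hF
  set E := PySem.Set.ofList F with hE
  have hnodup : E.Nodup := PySem.Set.nodup_ofList F
  have hfold : lst.foldl (fun st t => t.foldl nbInner st) (PySem.Dict.empty, 0) =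
      F.foldl nbInner (PySem.Dict.empty, 0) := by
    rw [hF, List.foldl_flatten]
  have hitems : (F.foldl nbInner (PySem.Dict.empty, (0:Int))).1.items =
      E.map (fun n => (n, (List.idxOf n F : Int))) := by
    rw [nbFirst_items F PySem.Dict.empty 0]
    have hie : (PySem.Dict.empty : PySem.Dict Int Int).items = [] := rfl
    rw [hie, List.nil_append, ← hE]
    simp [PySem.Dict.contains_empty]
  set first := (F.foldl nbInner (PySem.Dict.empty, (0:Int))).1 with hfirst
  have hkeys : first.keys = E := by
    simp only [PySem.Dict.keys, hitems, List.map_map]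
    have hcomp : ((fun p : Int × Int => p.1) ∘ (fun n : Int => (n, (List.idxOf n F : Int)))) =
        fun n : Int => n := rfl
    rw [hcomp, List.map_id']
  have hkeysnd : first.keys.Nodup := by rw [hkeys]; exact hnodup
  have hvals : first.values = E.map (fun n => (List.idxOf n F : Int)) := by
    simp only [PySem.Dict.values, hitems, List.map_map]
    rfl
  have hpair : E.Pairwise (fun a b => (List.idxOf a F : Int) < (List.idxOf b F : Int)) := by
    refine (ofList_pairwise_idxOf F).imp ?_
    intro a b hab
    exact_mod_cast hab
  have hranki : (nbRank first).items = E.map (fun n => (n, (List.idxOf n E : Int))) := by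
    unfold nbRank
    rw [PySem.Dict.items_foldl_insert_fresh first.items Prod.fst
      (fun np => nbCount first.values np.2) PySem.Dict.empty
      (fun a _ => PySem.Dict.contains_empty _) hkeysnd]
    have hie : (PySem.Dict.empty : PySem.Dict Int Int).items = [] := rfl
    rw [hie, List.nil_append, hitems, List.map_map]
    refine List.map_congr_left fun n hn => ?_
    simp only [Function.comp]
    rw [hvals]
    rw [count_lt_key E (fun n => (List.idxOf n F : Int)) hpair n hn]
  have hrkeysnd : (nbRank first).keys.Nodup := by
    simp only [PySem.Dict.keys, hranki, List.map_map]
    have hcomp : ((fun p : Int × Int => p.1) ∘ (fun n : Int => (n, (List.idxOf n E : Int)))) =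
        fun n : Int => n := rfl
    rw [hcomp, List.map_id']
    exact hnodup
  have hrget : ∀ n ∈ E, (nbRank first).getD n 0 = (List.idxOf n E : Int) := by
    intro n hn
    refine PySem.Dict.getD_of_mem_items _ ?_ hrkeysnd 0
    rw [hranki]
    exact List.mem_map.mpr ⟨n, hn, rfl⟩
  rw [hfold]
  refine Prod.ext ?_ ?_
  · simp only
    refine List.map_congr_left fun t ht => List.map_congr_left fun n hn => ?_
    have hnE : n ∈ E := (PySem.Set.mem_ofList F n).mpr (List.mem_flatten.mpr ⟨t, ht, hn⟩)
    rw [← hfirst, hrget n hnE, hE, hF]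
  · simp only
    rw [← hfirst, hkeys]
    have hcongr : E.foldl (fun d num => d.insert ((nbRank first).getD num 0) num)
          PySem.Dict.empty =
        E.foldl (fun d num => d.insert ((List.idxOf num E : Int)) num) PySem.Dict.empty := by
      refine PySem.List.foldl_congr_mem E _ _ _ ?_
      intro acc x hx
      rw [hrget x hx]
    rw [hcongr]
    have hmnd : (E.map (fun num => (List.idxOf num E : Int))).Nodup := by
      refine List.Nodup.map_on ?_ hnodup
      intro a ha b hb he
      exact idxOf_inj_mem hnodup ha hb (by exact_mod_cast he)
    rw [PySem.Dict.items_foldl_insert_fresh E (fun num => (List.idxOf num E : Int))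
      (fun num => num) PySem.Dict.empty (fun a _ => PySem.Dict.contains_empty _) hmnd]
    have hie : (PySem.Dict.empty : PySem.Dict Int Int).items = [] := rfl
    rw [hie, List.nil_append]
    have := map_idxOf_enumerate E hnodup
    -- swap pair components: our map is (idx, n) while map_idxOf_enumerate is about (idx, n) too
    rw [hE, hF] at *
    exact this

-- ===== VERDICT (by name: the statement is the Claim_ definition above) =====
theorem normalize_indexes_spec : Claim_equal_normalize_indexes := by
  intro lst _
  unfold Spec_normalize_indexes
  rw [A_char, B_char]
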